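-- pv_equiv track=rewrite | github.com/sikaxn/pySSP | pyssp/app.py | _parse_startup_args
-- ===== SOURCE A (Python) =====
-- def _parse_startup_args(argv: list[str]) -> tuple[list[str], bool, bool]:
--     clean_tokens = {"--cleanstart", "/cleanstart"}
--     debug_tokens = {"-debug", "--debug", "/debug"}
--     cleanstart = False
--     debug = False
--     filtered = [argv[0]] if argv else [""]
--     for arg in argv[1:]:
--         token = str(arg or "").strip().lower()
--         if token in clean_tokens:
--             cleanstart = True
--             continue
--         if token in debug_tokens:
--             debug = True
--             continue
--         filtered.append(arg)
--     return filtered, cleanstart, debug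
-- ===== SOURCE B (Python) =====
-- def _parse_startup_args(argv: list[str]) -> tuple[list[str], bool, bool]:
--     clean_tokens = {"--cleanstart", "/cleanstart"}
--     debug_tokens = {"-debug", "--debug", "/debug"}
--
--     def norm(a):
--         return str(a or "").strip().lower()
--
--     rest = argv[1:]
--     cleanstart = any(norm(a) in clean_tokens for a in rest)
--     debug = any(norm(a) in debug_tokens for a in rest)
--     skip = clean_tokens | debug_tokens
--     filtered = ([argv[0]] if argv else [""]) + [a for a in rest if norm(a) not in skip]
--     return filtered, cleanstart, debug
-- ===== Notes on version B (the rewrite author's own statement) =====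
-- stated objective: alternative
-- what changed: Replaces A's single fused loop with three mutable accumulators by three independent passes over argv[1:]: two any() scans for the flags and one comprehension building the filtered list.
import Mathlib
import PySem

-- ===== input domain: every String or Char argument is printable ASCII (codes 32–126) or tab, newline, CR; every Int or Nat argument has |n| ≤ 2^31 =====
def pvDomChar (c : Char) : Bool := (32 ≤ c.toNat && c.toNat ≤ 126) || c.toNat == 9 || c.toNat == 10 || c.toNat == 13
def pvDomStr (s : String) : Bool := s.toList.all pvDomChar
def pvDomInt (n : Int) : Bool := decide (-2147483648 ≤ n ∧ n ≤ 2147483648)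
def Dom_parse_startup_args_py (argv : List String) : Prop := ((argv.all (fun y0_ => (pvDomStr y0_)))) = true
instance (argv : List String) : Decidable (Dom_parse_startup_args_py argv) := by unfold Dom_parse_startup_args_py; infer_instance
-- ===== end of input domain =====

-- B replaces A's single fused accumulator loop by three independent passes (two any-scans and one filter); same cost, different decomposition.


-- ===== PORT A =====
-- helper shared by both transliterations: token = str(arg or "").strip().lower()
-- (arguments are strings, so `arg or ""` is `arg` itself when nonempty and "" otherwise — either way strip/lower of arg)
def pvNorm (s : String) : String := PySem.Str.lower (PySem.Str.strip s)

def pvClean : List String := ["--cleanstart", "/cleanstart"]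
def pvDebug : List String := ["-debug", "--debug", "/debug"]

-- A: one fused loop carrying (filtered, cleanstart, debug)
def parse_startup_args_py (argv : List String) : List String × Bool × Bool :=
  let init : List String := match argv with | [] => [""] | a :: _ => [a]
  (argv.drop 1).foldl
    (fun st arg =>
      let token := pvNorm arg
      if pvClean.contains token then (st.1, true, st.2.2)
      else if pvDebug.contains token then (st.1, st.2.1, true)
      else (st.1 ++ [arg], st.2.1, st.2.2))
    (init, false, false)

-- ===== PORT B =====
-- B: three independent passes over argv[1:]
def parse_startup_args_py_alt (argv : List String) : List String × Bool × Bool :=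
  let rest := argv.drop 1
  let cleanstart := rest.any (fun a => pvClean.contains (pvNorm a))
  let debug := rest.any (fun a => pvDebug.contains (pvNorm a))
  let filtered := (match argv with | [] => [""] | a :: _ => [a]) ++
    rest.filter (fun a => !(pvClean.contains (pvNorm a) || pvDebug.contains (pvNorm a)))
  (filtered, cleanstart, debug)

-- ===== PRECONDITION & SPEC =====
def Spec_parse_startup_args_py (argv : List String) (out : List String × Bool × Bool) : Prop := out = parse_startup_args_py_alt argv
instance (argv : List String) (out : List String × Bool × Bool) : Decidable (Spec_parse_startup_args_py argv out) := by unfold Spec_parse_startup_args_py; infer_instance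

-- ===== CLAIM (what is proved, stated in full; the proofs are below) =====
def Claim_equal_parse_startup_args_py : Prop := ∀ (argv : List String), Dom_parse_startup_args_py argv → Spec_parse_startup_args_py argv (parse_startup_args_py argv)

-- ===== LEMMAS AND PROOFS =====
theorem pv_loop_eq (rest : List String) (init : List String) (c d : Bool) :
    rest.foldl
      (fun st arg =>
        let token := pvNorm arg
        if pvClean.contains token then (st.1, true, st.2.2)
        else if pvDebug.contains token then (st.1, st.2.1, true)
        else (st.1 ++ [arg], st.2.1, st.2.2))
      (init, c, d)
    = (init ++ rest.filter (fun a => !(pvClean.contains (pvNorm a) || pvDebug.contains (pvNorm a))),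
       c || rest.any (fun a => pvClean.contains (pvNorm a)),
       d || rest.any (fun a => pvDebug.contains (pvNorm a))) := by
  induction rest generalizing init c d with
  | nil => simp
  | cons a t ih =>
    simp only [List.foldl_cons, List.filter_cons, List.any_cons]
    simp only [List.contains_eq_mem, decide_eq_true_eq, Bool.not_or] at ih
    by_cases h1 : pvNorm a ∈ pvClean
    · have h2 : pvNorm a ∉ pvDebug := by
        simp only [pvClean, List.mem_cons, List.not_mem_nil, or_false] at h1
        rcases h1 with h | h <;> simp [pvDebug, h]
      simp [h1, h2, ih]
    · by_cases h2 : pvNorm a ∈ pvDebug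
      · simp [h1, h2, ih]
      · simp [h1, h2, ih]

-- ===== VERDICT (by name: the statement is the Claim_ definition above) =====
theorem parse_startup_args_py_spec : Claim_equal_parse_startup_args_py := by
  intro argv _
  unfold Spec_parse_startup_args_py parse_startup_args_py parse_startup_args_py_alt
  simp only [pv_loop_eq, Bool.false_or]
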